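-- pv_equiv track=rewrite | github.com/jestabro/vyos-1x | python/vyos/configdiff.py | _key_sets_from_dicts
-- ===== SOURCE A (Python) =====
-- from enum import IntFlag, auto
--
-- def enum_to_key(e):
--     return e.name.lower()
--
-- class Diff(IntFlag):
--     MERGE = auto()
--     DELETE = auto()
--     ADD = auto()
--     STABLE = auto()
--
-- def _key_sets_from_dicts(session_dict, effective_dict):
--     session_keys = list(session_dict)
--     effective_keys = list(effective_dict)
--
--     ret = {}
--     stable_keys = [k for k in session_keys if k in effective_keys]
--
--     ret[enum_to_key(Diff.STABLE)] = stable_keys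
--     ret[enum_to_key(Diff.ADD)] = [k for k in session_keys if k not in stable_keys]
--     ret[enum_to_key(Diff.DELETE)] = [k for k in effective_keys if k not in stable_keys]
--     ret[enum_to_key(Diff.MERGE)] = session_keys
--
--     return ret
-- ===== SOURCE B (Python) =====
-- def _key_sets_from_dicts(session_dict, effective_dict):
--     # One tag dict classifies every key; the four output lists are read off
--     # from its insertion-ordered items instead of A's dependent comprehensions.
--     tag = {}
--     for k in session_dict:
--         tag[k] = 1
--     for k in effective_dict:
--         tag[k] = 3 if k in tag else 2
--     return {'stable': [k for k, v in tag.items() if v == 3],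
--             'add':    [k for k, v in tag.items() if v == 1],
--             'delete': [k for k, v in tag.items() if v == 2],
--             'merge':  [k for k, v in tag.items() if v != 2]}
-- ===== Notes on version B (the rewrite author's own statement) =====
-- stated objective: faster
-- what changed: Instead of A's comprehensions with nested list scans, B builds one insertion-ordered tag dict marking each key as session-only/effective-only/both in two linear passes, then reads all four output lists off the tag items by value.
import Mathlib
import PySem

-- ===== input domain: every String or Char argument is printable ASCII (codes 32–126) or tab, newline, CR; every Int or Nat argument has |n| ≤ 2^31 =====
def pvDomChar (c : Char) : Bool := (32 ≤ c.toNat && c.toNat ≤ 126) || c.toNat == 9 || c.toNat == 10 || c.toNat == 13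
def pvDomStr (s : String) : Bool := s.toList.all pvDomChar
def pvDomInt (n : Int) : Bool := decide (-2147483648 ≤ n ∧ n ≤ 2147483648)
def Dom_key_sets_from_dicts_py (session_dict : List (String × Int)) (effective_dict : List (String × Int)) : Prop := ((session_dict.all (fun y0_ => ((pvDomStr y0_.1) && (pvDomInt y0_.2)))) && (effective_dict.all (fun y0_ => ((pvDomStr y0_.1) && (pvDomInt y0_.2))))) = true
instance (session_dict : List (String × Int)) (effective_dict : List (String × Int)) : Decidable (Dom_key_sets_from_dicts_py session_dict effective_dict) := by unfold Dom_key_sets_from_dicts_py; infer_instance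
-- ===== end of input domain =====

-- B builds one insertion-ordered tag dict classifying every key (session-only /
-- effective-only / both) in two linear passes and reads the four output lists off
-- its items, instead of A's dependent comprehensions; return value only (no mutation).

-- ===== PORT A =====
def key_sets_from_dicts_py (session_dict : List (String × Int)) (effective_dict : List (String × Int)) : List (String × List String) :=
  let session_keys := session_dict.map Prod.fst
  let effective_keys := effective_dict.map Prod.fst
  let ret : PySem.Dict String (List String) := PySem.Dict.empty
  let stable_keys := session_keys.filter (fun k => effective_keys.contains k)
  let ret := ret.insert "stable" stable_keys
  let ret := ret.insert "add" (session_keys.filter (fun k => !stable_keys.contains k))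
  let ret := ret.insert "delete" (effective_keys.filter (fun k => !stable_keys.contains k))
  let ret := ret.insert "merge" session_keys
  ret.items

-- ===== PORT B =====
def key_sets_from_dicts_py_alt (session_dict : List (String × Int)) (effective_dict : List (String × Int)) : List (String × List String) :=
  -- tag = {}; for k in session_dict: tag[k] = 1
  let tag : PySem.Dict String Int :=
    (session_dict.map Prod.fst).foldl (fun d k => d.insert k 1) PySem.Dict.empty
  -- for k in effective_dict: tag[k] = 3 if k in tag else 2
  let tag :=
    (effective_dict.map Prod.fst).foldl
      (fun d k => d.insert k (if d.contains k then 3 else 2)) tag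
  [("stable", (tag.items.filter (fun p => p.2 == 3)).map Prod.fst),
   ("add",    (tag.items.filter (fun p => p.2 == 1)).map Prod.fst),
   ("delete", (tag.items.filter (fun p => p.2 == 2)).map Prod.fst),
   ("merge",  (tag.items.filter (fun p => p.2 != 2)).map Prod.fst)]

-- ===== PRECONDITION & SPEC =====
-- The assoc-list arguments model Python dicts, whose keys are necessarily distinct;
-- lists with duplicate keys represent no Python input, so they are outside the claim.
def Pre_key_sets_from_dicts_py (session_dict : List (String × Int)) (effective_dict : List (String × Int)) : Prop :=
  (session_dict.map Prod.fst).Nodup ∧ (effective_dict.map Prod.fst).Nodup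
instance (session_dict : List (String × Int)) (effective_dict : List (String × Int)) : Decidable (Pre_key_sets_from_dicts_py session_dict effective_dict) := by unfold Pre_key_sets_from_dicts_py; infer_instance

def pvWitness_key_sets_from_dicts_py : (List (String × Int)) × (List (String × Int)) :=
  ([("a", 1), ("b", 2)], [("b", 3), ("c", 4)])

def Spec_key_sets_from_dicts_py (session_dict : List (String × Int)) (effective_dict : List (String × Int)) (out : List (String × List String)) : Prop := out = key_sets_from_dicts_py_alt session_dict effective_dict
instance (session_dict : List (String × Int)) (effective_dict : List (String × Int)) (out : List (String × List String)) : Decidable (Spec_key_sets_from_dicts_py session_dict effective_dict out) := by unfold Spec_key_sets_from_dicts_py; infer_instance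

-- ===== CLAIM (what is proved, stated in full; the proofs are below) =====
def Claim_equal_key_sets_from_dicts_py : Prop := ∀ (session_dict : List (String × Int)) (effective_dict : List (String × Int)), Dom_key_sets_from_dicts_py session_dict effective_dict → Pre_key_sets_from_dicts_py session_dict effective_dict → Spec_key_sets_from_dicts_py session_dict effective_dict (key_sets_from_dicts_py session_dict effective_dict)

-- ===== LEMMAS AND PROOFS =====

-- effect of B's second loop on any Nodup-keyed dict, for Nodup effective keys
theorem tag_phase2 (ek : List String) (d : PySem.Dict String Int)
    (hek : ek.Nodup) (hd : d.keys.Nodup) :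
    (ek.foldl (fun d k => d.insert k (if d.contains k then 3 else 2)) d).items
      = d.items.map (fun p => if p.1 ∈ ek then (p.1, (3 : Int)) else p)
        ++ (ek.filter (fun k => !d.contains k)).map (fun k => (k, (2 : Int))) := by
  induction ek generalizing d with
  | nil => simp
  | cons x xs ih =>
    obtain ⟨hx, hxs⟩ := List.nodup_cons.mp hek
    by_cases hc : d.contains x = true
    · have hitems := PySem.Dict.items_insert_of_contains (d := d) (v := (3 : Int)) hc
      have hkeys : (d.insert x (3 : Int)).keys = d.keys :=
        PySem.Dict.keys_insert_of_contains (d := d) (v := (3 : Int)) hc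
      have hcont : ∀ k, (d.insert x (3 : Int)).contains k = d.contains k := by
        intro k
        rw [Bool.eq_iff_iff, PySem.Dict.contains_iff_mem_keys,
          PySem.Dict.contains_iff_mem_keys, hkeys]
      simp only [List.foldl_cons, hc, if_true]
      rw [ih _ hxs (by rw [hkeys]; exact hd), hitems]
      rw [List.map_map]
      congr 1
      · apply List.map_congr_left
        intro p hp
        by_cases hpx : p.1 = x
        · simp [hpx, hx]
        · simp [Function.comp, hpx, beq_iff_eq]
      · apply congrArg
        rw [List.filter_cons_of_neg (by simp [hc])]
        apply List.filter_congr
        intro k hk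
        rw [hcont]
    · have hc' : d.contains x = false := by simpa using hc
      have hitems := PySem.Dict.items_insert_of_not_contains (d := d) (v := (2 : Int)) hc'
      have hkeys : (d.insert x (2 : Int)).keys = d.keys ++ [x] :=
        PySem.Dict.keys_insert_of_not_contains (d := d) (v := (2 : Int)) hc'
      have hxk : x ∉ d.keys := by
        rw [← PySem.Dict.contains_iff_mem_keys]; simp [hc']
      have hcont : ∀ k, (d.insert x (2 : Int)).contains k = (k == x || d.contains k) := by
        intro k; rw [PySem.Dict.contains_insert]
      have hnd' : (d.insert x (2 : Int)).keys.Nodup := by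
        rw [hkeys]
        refine List.Nodup.append hd (List.nodup_singleton x) ?_
        intro a ha hb
        rw [List.mem_singleton] at hb
        exact absurd (hb ▸ ha) hxk
      simp only [List.foldl_cons, hc', Bool.false_eq_true, if_false]
      rw [ih _ hxs hnd', hitems]
      simp only [List.map_append, List.map_cons, List.map_nil, if_neg hx]
      rw [List.append_assoc]
      congr 1
      · apply List.map_congr_left
        intro p hp
        have hpx : p.1 ≠ x := by
          intro h
          apply hxk
          rw [← h]
          exact List.mem_map_of_mem hp
        by_cases hmem : p.1 ∈ xs <;> simp [hmem, hpx]
      · rw [List.filter_cons_of_pos (by simp [hc'])]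
        have hfe : List.filter (fun k => !(d.insert x (2 : Int)).contains k) xs
            = List.filter (fun k => !d.contains k) xs := by
          apply List.filter_congr
          intro k hk
          have hkx : k ≠ x := fun h => hx (h ▸ hk)
          simp [hcont, hkx]
        rw [hfe, List.map_cons]
        rfl

-- items of B's tag dict, for Nodup key lists
theorem tag_items (sk ek : List String) (hsk : sk.Nodup) (hek : ek.Nodup) :
    (ek.foldl (fun d k => d.insert k (if d.contains k then 3 else 2))
        (sk.foldl (fun d k => d.insert k 1) PySem.Dict.empty)).items
      = sk.map (fun k => (k, if k ∈ ek then (3 : Int) else 1))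
        ++ (ek.filter (fun k => !sk.contains k)).map (fun k => (k, (2 : Int))) := by
  have h1 : (sk.foldl (fun d k => d.insert k (1 : Int)) PySem.Dict.empty).items
      = sk.map (fun k => (k, (1 : Int))) := by
    have := PySem.Dict.items_foldl_insert_fresh (l := sk) (d := (PySem.Dict.empty : PySem.Dict String Int))
      (k := id) (v := fun _ => (1 : Int)) (by intro a _; simp) (by simpa using hsk)
    simpa using this
  have hkeys : (sk.foldl (fun d k => d.insert k (1 : Int)) PySem.Dict.empty).keys = sk := by
    simp [PySem.Dict.keys, h1, List.map_map, Function.comp_def]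
  have hcont : ∀ k, (sk.foldl (fun d k => d.insert k (1 : Int)) PySem.Dict.empty).contains k
      = sk.contains k := by
    intro k
    rw [Bool.eq_iff_iff, PySem.Dict.contains_iff_mem_keys, hkeys, List.contains_iff_mem]
  rw [tag_phase2 _ _ hek (by rw [hkeys]; exact hsk), h1]
  congr 1
  · rw [List.map_map]
    apply List.map_congr_left
    intro k hk
    by_cases hmem : k ∈ ek <;> simp [hmem]
  · apply congrArg
    apply List.filter_congr
    intro k hk
    rw [hcont]

theorem key_sets_main (session_dict : List (String × Int)) (effective_dict : List (String × Int))
    (hs : (session_dict.map Prod.fst).Nodup) (he : (effective_dict.map Prod.fst).Nodup) :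
    key_sets_from_dicts_py session_dict effective_dict
      = key_sets_from_dicts_py_alt session_dict effective_dict := by
  have hA : key_sets_from_dicts_py session_dict effective_dict
      = [("stable", (session_dict.map Prod.fst).filter (fun k => (effective_dict.map Prod.fst).contains k)),
         ("add", (session_dict.map Prod.fst).filter (fun k => !(effective_dict.map Prod.fst).contains k)),
         ("delete", (effective_dict.map Prod.fst).filter (fun k => !(session_dict.map Prod.fst).contains k)),
         ("merge", session_dict.map Prod.fst)] := by
    simp only [key_sets_from_dicts_py]
    simp [PySem.Dict.insert, PySem.Dict.empty, PySem.Dict.contains]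
    constructor
    · apply List.filter_congr; intro k hk; simp [List.mem_filter, hk]
    · apply List.filter_congr; intro k hk; simp [List.mem_filter, hk]
  simp only [key_sets_from_dicts_py_alt]
  rw [tag_items _ _ hs he, hA]
  set sk := session_dict.map Prod.fst with hsk
  set ek := effective_dict.map Prod.fst with hek
  simp only [List.filter_append, List.filter_map, List.map_append, List.map_map,
    Function.comp_def, List.cons.injEq, Prod.mk.injEq, true_and, and_true]
  refine ⟨?_, ?_, ?_, ?_⟩
  · simp
    apply List.filter_congr
    intro k hk
    by_cases hm : k ∈ ek <;> simp [hm]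
  · simp
    apply List.filter_congr
    intro k hk
    by_cases hm : k ∈ ek <;> simp [hm]
  · simp
    intro a _
    by_cases hm : a ∈ ek <;> simp [hm]
  · simp
    symm
    apply List.filter_eq_self.mpr
    intro k hk
    by_cases hm : k ∈ ek <;> simp [hm]

-- ===== VERDICT (by name: the statement is the Claim_ definition above) =====
theorem key_sets_from_dicts_py_spec : Claim_equal_key_sets_from_dicts_py := by
  intro s e _ hpre
  exact key_sets_main s e hpre.1 hpre.2
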